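-- pv_equiv track=rewrite | github.com/georgemarsh1809/InfoSumTask | main.py | calculate_overlap_product
-- ===== SOURCE A (Python) =====
-- def count_overlap(file1_keys, file2_keys):
--     # First, get the set (an array of unique keys) for each file:
--     file1_set, file2_set = set(file1_keys), set(file2_keys)
--
--     # Initialise an empty array to contain the keys that overlap:
--     overlap_array = []
--
--     # Iterate over set1, and check if each key is in set2:
--     for key in file1_set:
--         if key in file2_set:
--             # ...if the key is in both sets, add it to the overlap_array:
--             overlap_array.append(key)
--
--     # Returning the array for use in calculate_overlap_product()
--     # The actual overlap_count can be returned by getting the len() of overlap_array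
--     return overlap_array
--
-- def calculate_overlap_product(file1_keys, file2_keys):
--     # Get the set of all overlapping keys
--     overlap_array = count_overlap(file1_keys, file2_keys)
--
--     # Initialise overlap_product to 0
--     overlap_product = 0
--
--     # for each key in the set:
--     for key in overlap_array:
--         # Calculate the count of that key in file1_keys and file2_keys
--         file1_count = file1_keys.count(key)
--         file2_count = file2_keys.count(key)
--
--         # Increment overlap_product by the product of each
--         overlap_product += file1_count * file2_count
--
--     return overlap_product
-- ===== SOURCE B (Python) =====
-- def calculate_overlap_product(file1_keys, file2_keys):
--     # One pass over file1_keys builds a count table; one accumulating pass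
--     # over file2_keys sums the file1-count of each element.  The sum over
--     # file2 of count1(x) equals the sum over common keys of count1*count2.
--     count1 = {}
--     for k in file1_keys:
--         count1[k] = count1.get(k, 0) + 1
--     total = 0
--     for x in file2_keys:
--         total += count1.get(x, 0)
--     return total
-- ===== Notes on version B (the rewrite author's own statement) =====
-- stated objective: faster
-- what changed: Replaces the build-overlap-set-then-per-key .count() scans with one counting pass over file1_keys and a single accumulating pass over file2_keys using the prebuilt table, relying on the identity sum_{x in file2} count1(x) = sum_{k common} count1(k)*count2(k).
import Mathlib
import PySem

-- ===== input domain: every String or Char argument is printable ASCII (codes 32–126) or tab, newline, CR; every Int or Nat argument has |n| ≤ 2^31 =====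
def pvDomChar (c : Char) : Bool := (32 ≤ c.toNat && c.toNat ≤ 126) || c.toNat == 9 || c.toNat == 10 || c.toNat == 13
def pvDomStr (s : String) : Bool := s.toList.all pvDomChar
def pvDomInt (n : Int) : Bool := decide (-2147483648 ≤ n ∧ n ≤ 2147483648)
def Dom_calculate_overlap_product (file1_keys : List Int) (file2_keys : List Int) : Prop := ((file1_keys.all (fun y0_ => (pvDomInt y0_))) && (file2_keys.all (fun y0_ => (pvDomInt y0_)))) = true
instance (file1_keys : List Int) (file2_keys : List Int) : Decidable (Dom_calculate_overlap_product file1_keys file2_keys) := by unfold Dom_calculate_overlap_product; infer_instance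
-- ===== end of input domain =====

-- B replaces A's overlap-set plus per-key .count() scans by one counting pass
-- over file1_keys and one accumulating pass over file2_keys (objective: faster).
-- A iterates over a Python set; its result is a sum, hence independent of the
-- unmodelled hash iteration order, so the port folds over the Set's element list.

-- ===== PORT A =====
def count_overlap (file1_keys : List Int) (file2_keys : List Int) : List Int :=
  let file1_set := PySem.Set.ofList file1_keys
  let file2_set := PySem.Set.ofList file2_keys
  file1_set.foldl (fun acc key => if PySem.Set.contains file2_set key then acc ++ [key] else acc) []

def calculate_overlap_product (file1_keys : List Int) (file2_keys : List Int) : Int :=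
  (count_overlap file1_keys file2_keys).foldl
    (fun overlap_product key =>
      overlap_product + (PySem.List.count file1_keys key) * (PySem.List.count file2_keys key)) 0

-- ===== PORT B =====
def calculate_overlap_product_alt (file1_keys : List Int) (file2_keys : List Int) : Int :=
  let count1 := file1_keys.foldl (fun d k => d.insert k (d.getD k 0 + 1)) PySem.Dict.empty
  file2_keys.foldl (fun total x => total + count1.getD x 0) 0

-- ===== PRECONDITION & SPEC =====
def Spec_calculate_overlap_product (file1_keys : List Int) (file2_keys : List Int) (out : Int) : Prop := out = calculate_overlap_product_alt file1_keys file2_keys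
instance (file1_keys : List Int) (file2_keys : List Int) (out : Int) : Decidable (Spec_calculate_overlap_product file1_keys file2_keys out) := by unfold Spec_calculate_overlap_product; infer_instance

-- ===== CLAIM (what is proved, stated in full; the proofs are below) =====
def Claim_equal_calculate_overlap_product : Prop := ∀ (file1_keys : List Int) (file2_keys : List Int), Dom_calculate_overlap_product file1_keys file2_keys → Spec_calculate_overlap_product file1_keys file2_keys (calculate_overlap_product file1_keys file2_keys)

-- ===== LEMMAS AND PROOFS =====

-- The overlap list A builds, as a plain filter of the deduplicated file1 keys.
def overlapL (l1 l2 : List Int) : List Int :=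
  (PySem.Set.ofList l1).filter (fun k => decide (k ∈ l2))

-- B's first loop really builds the count table of file1_keys.
theorem getD_countfold (l : List Int) (d : PySem.Dict Int Int) (v : Int) :
    (l.foldl (fun d k => d.insert k (d.getD k 0 + 1)) d).getD v 0
      = d.getD v 0 + (l.count v : Int) := by
  induction l generalizing d with
  | nil => simp
  | cons a l ih =>
    simp only [List.foldl_cons, ih, PySem.Dict.getD_insert, List.count_cons]
    by_cases h : v = a
    · subst h; simp; ring
    · have : ¬ (a = v) := fun e => h e.symm
      simp [h, this]

-- B computes the sum over file2_keys of file1-counts.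
theorem alt_eq_sum (l1 l2 : List Int) :
    calculate_overlap_product_alt l1 l2
      = (l2.map (fun x => (l1.count x : Int))).sum := by
  unfold calculate_overlap_product_alt
  rw [PySem.List.foldl_add]
  simp only [getD_countfold]
  simp [PySem.Dict.getD_empty]

-- A computes the sum of count products over the deduplicated common keys.
theorem a_eq_sum (l1 l2 : List Int) :
    calculate_overlap_product l1 l2
      = ((overlapL l1 l2).map
          (fun k => (l1.count k : Int) * (l2.count k : Int))).sum := by
  unfold calculate_overlap_product count_overlap overlapL
  rw [PySem.List.foldl_append_if_eq_filter]
  rw [PySem.List.foldl_add]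
  have hp : (PySem.Set.ofList l2).contains = (fun k : Int => decide (k ∈ l2)) := by
    funext k; simp [PySem.Set.contains, PySem.Set.mem_ofList]
  simp [PySem.List.count_eq, hp]

-- The membership structure of A's overlap list.
theorem overlap_toFinset (l1 l2 : List Int) :
    (overlapL l1 l2).toFinset = l1.toFinset ∩ l2.toFinset := by
  ext m
  simp [overlapL, PySem.Set.mem_ofList]

-- The central identity: summing file1-counts over file2 groups into
-- count products over the common keys.
theorem sum_counts_eq (l1 l2 : List Int) :
    (l2.map (fun x => (l1.count x : Int))).sum
      = ((overlapL l1 l2).map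
          (fun k => (l1.count k : Int) * (l2.count k : Int))).sum := by
  have hnd : (overlapL l1 l2).Nodup := (PySem.Set.nodup_ofList l1).filter _
  rw [← List.sum_toFinset _ hnd, overlap_toFinset]
  rw [Finset.sum_list_map_count]
  have hsub : l1.toFinset ∩ l2.toFinset ⊆ l2.toFinset := Finset.inter_subset_right
  have hz : ∀ m ∈ l2.toFinset, m ∉ l1.toFinset ∩ l2.toFinset →
      l2.count m • (l1.count m : Int) = 0 := by
    intro m hm2 hm
    have h1 : m ∉ l1 := by
      intro h
      exact hm (Finset.mem_inter.mpr ⟨List.mem_toFinset.mpr h, hm2⟩)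
    simp [List.count_eq_zero_of_not_mem h1]
  rw [← Finset.sum_subset hsub hz]
  apply Finset.sum_congr rfl
  intro m _
  ring

-- ===== VERDICT (by name: the statement is the Claim_ definition above) =====
theorem calculate_overlap_product_spec : Claim_equal_calculate_overlap_product := by
  intro l1 l2 _
  unfold Spec_calculate_overlap_product
  rw [a_eq_sum, alt_eq_sum, sum_counts_eq]
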